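-- pv_equiv track=rewrite | github.com/ThatOneDevil/Python | denaryToHex.py | hexToDenary
-- ===== SOURCE A (Python) =====
-- def hexToDenary(hex):
--     numbers=["10","11","12","13","14","15"]
--     letters=["A","B","C","D","E","F"]
--     if hex != range(1,9):
--         for i in range(0,6):
--             if letters[i] == hex:
--                 return numbers[i]
--     else:
--         return hex
-- ===== SOURCE B (Python) =====
-- def hexToDenary(hex):
--     if isinstance(hex, str) and len(hex) == 1 and 'A' <= hex <= 'F':
--         return str(ord(hex) - 55)
--     return None
-- ===== Notes on version B (the rewrite author's own statement) =====
-- stated objective: idiomatic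
-- what changed: Replaces the parallel letters/numbers tables and the range(0,6) scan by a closed-form range guard and str(ord(hex) - 55).
import Mathlib
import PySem

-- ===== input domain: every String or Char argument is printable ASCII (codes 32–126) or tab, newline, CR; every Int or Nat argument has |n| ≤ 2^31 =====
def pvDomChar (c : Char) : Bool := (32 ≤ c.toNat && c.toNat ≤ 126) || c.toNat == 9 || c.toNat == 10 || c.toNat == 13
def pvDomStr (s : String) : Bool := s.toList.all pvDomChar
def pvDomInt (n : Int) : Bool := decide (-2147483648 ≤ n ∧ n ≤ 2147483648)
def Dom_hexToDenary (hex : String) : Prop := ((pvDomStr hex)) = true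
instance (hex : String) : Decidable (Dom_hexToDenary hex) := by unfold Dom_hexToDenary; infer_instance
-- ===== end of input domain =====

-- B replaces A's parallel-table scan by a closed-form guard plus arithmetic: no tables, str(ord(hex)-55); objective: idiomatic.

-- ===== PORT A =====
-- the for-loop over i in range(0,6) reading letters[i]/numbers[i]; ported as a
-- recursion over the zipped (letter, number) pairs in the same order, with A's early return
def hexLoopA (hex : String) : List (String × String) → Option String
  | [] => none
  | (l, n) :: rest => if l == hex then some n else hexLoopA hex rest

def hexToDenary (hex : String) : Option String :=
  let numbers := ["10", "11", "12", "13", "14", "15"]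
  let letters := ["A", "B", "C", "D", "E", "F"]
  -- Python's `hex != range(1,9)` is always True for a str argument (different types
  -- are never equal), so the else-branch `return hex` is dead code and is not ported.
  hexLoopA hex (List.zip letters numbers)

-- ===== PORT B =====
def hexToDenary_alt (hex : String) : Option String :=
  -- if isinstance(hex, str) and len(hex) == 1 and 'A' <= hex <= 'F': return str(ord(hex) - 55)
  match hex.toList with
  | [c] => if 'A' ≤ c ∧ c ≤ 'F' then some (PySem.Int.toStr ((c.toNat : Int) - 55)) else none
  | _ => none

-- ===== PRECONDITION & SPEC =====
def Spec_hexToDenary (hex : String) (out : Option String) : Prop := out = hexToDenary_alt hex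
instance (hex : String) (out : Option String) : Decidable (Spec_hexToDenary hex out) := by unfold Spec_hexToDenary; infer_instance

-- ===== CLAIM (what is proved, stated in full; the proofs are below) =====
def Claim_equal_hexToDenary : Prop := ∀ (hex : String), Dom_hexToDenary hex → Spec_hexToDenary hex (hexToDenary hex)

-- ===== LEMMAS AND PROOFS =====

theorem char_eq_of_toNat (c : Char) (d : Char) (h : c.toNat = d.toNat) : c = d := by
  apply Char.ext
  apply UInt32.toNat_inj.mp
  exact h

theorem le_char_iff (c d : Char) : (c ≤ d) ↔ c.toNat ≤ d.toNat := by
  rw [Char.le_def, UInt32.le_iff_toNat_le]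
  exact Iff.rfl

theorem beq_false_of_toList_ne (s hex : String) (h : s.toList ≠ hex.toList) : (s == hex) = false := by
  apply beq_eq_false_iff_ne.mpr
  intro e; exact h (by rw [e])

-- the A-side scan, written out as its chain of comparisons
theorem hexA_char (hex : String) :
    hexToDenary hex =
      if "A" == hex then some "10" else if "B" == hex then some "11" else
      if "C" == hex then some "12" else if "D" == hex then some "13" else
      if "E" == hex then some "14" else if "F" == hex then some "15" else none := by
  simp only [hexToDenary, List.zip, List.zipWith, hexLoopA]

theorem hexToDenary_eq_alt (hex : String) : hexToDenary hex = hexToDenary_alt hex := by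
  unfold hexToDenary_alt
  rw [hexA_char]
  rcases h : hex.toList with _ | ⟨c, _ | ⟨c2, rest⟩⟩
  · rw [beq_false_of_toList_ne "A" hex (by rw [h]; decide),
        beq_false_of_toList_ne "B" hex (by rw [h]; decide),
        beq_false_of_toList_ne "C" hex (by rw [h]; decide),
        beq_false_of_toList_ne "D" hex (by rw [h]; decide),
        beq_false_of_toList_ne "E" hex (by rw [h]; decide),
        beq_false_of_toList_ne "F" hex (by rw [h]; decide)]
    simp
  · by_cases hc : 'A' ≤ c ∧ c ≤ 'F'
    · have h1 : 65 ≤ c.toNat := (le_char_iff 'A' c).mp hc.1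
      have h2 : c.toNat ≤ 70 := (le_char_iff c 'F').mp hc.2
      interval_cases hn : c.toNat
      · have hd := char_eq_of_toNat c 'A' hn; subst hd
        have hx : hex = "A" := String.toList_inj.mp (by rw [h]; decide); subst hx; decide
      · have hd := char_eq_of_toNat c 'B' hn; subst hd
        have hx : hex = "B" := String.toList_inj.mp (by rw [h]; decide); subst hx; decide
      · have hd := char_eq_of_toNat c 'C' hn; subst hd
        have hx : hex = "C" := String.toList_inj.mp (by rw [h]; decide); subst hx; decide
      · have hd := char_eq_of_toNat c 'D' hn; subst hd
        have hx : hex = "D" := String.toList_inj.mp (by rw [h]; decide); subst hx; decide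
      · have hd := char_eq_of_toNat c 'E' hn; subst hd
        have hx : hex = "E" := String.toList_inj.mp (by rw [h]; decide); subst hx; decide
      · have hd := char_eq_of_toNat c 'F' hn; subst hd
        have hx : hex = "F" := String.toList_inj.mp (by rw [h]; decide); subst hx; decide
    · rw [beq_false_of_toList_ne "A" hex (by rw [h]; simp; intro e; subst e; exact hc ⟨by decide, by decide⟩),
          beq_false_of_toList_ne "B" hex (by rw [h]; simp; intro e; subst e; exact hc ⟨by decide, by decide⟩),
          beq_false_of_toList_ne "C" hex (by rw [h]; simp; intro e; subst e; exact hc ⟨by decide, by decide⟩),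
          beq_false_of_toList_ne "D" hex (by rw [h]; simp; intro e; subst e; exact hc ⟨by decide, by decide⟩),
          beq_false_of_toList_ne "E" hex (by rw [h]; simp; intro e; subst e; exact hc ⟨by decide, by decide⟩),
          beq_false_of_toList_ne "F" hex (by rw [h]; simp; intro e; subst e; exact hc ⟨by decide, by decide⟩)]
      simp [hc]
  · rw [beq_false_of_toList_ne "A" hex (by rw [h]; simp),
        beq_false_of_toList_ne "B" hex (by rw [h]; simp),
        beq_false_of_toList_ne "C" hex (by rw [h]; simp),
        beq_false_of_toList_ne "D" hex (by rw [h]; simp),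
        beq_false_of_toList_ne "E" hex (by rw [h]; simp),
        beq_false_of_toList_ne "F" hex (by rw [h]; simp)]
    simp

-- ===== VERDICT (by name: the statement is the Claim_ definition above) =====
theorem hexToDenary_spec : Claim_equal_hexToDenary := by
  intro hex _
  exact hexToDenary_eq_alt hex
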